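-- pv_equiv track=rewrite | github.com/ejpark78/nlp-utils | crawler/archive/twitter/twitter.py | merge_values
-- ===== SOURCE A (Python) =====
-- def merge_values(doc):
--     """배열 형태의 댓글을 dictionary 형태로 변환한다."""
--     max_size = 0
--     for k in doc:
--         if isinstance(doc[k], list):
--             max_size = len(doc[k])
--         elif isinstance(doc[k], str):
--             max_size = 1
--
--         break
--
--     k0 = ''
--
--     result = []
--     for i in range(max_size):
--         item = {}
--         for k in doc:
--             token = k.split('.', maxsplit=1)
--
--             k0 = token[0]
--             k1 = token[1]
--
--             if len(doc[k]) > i: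
--                 item[k1] = doc[k][i]
--
--         result.append(item)
--
--     return k0, result
-- ===== SOURCE B (Python) =====
-- def merge_values(doc):
--     """배열 형태의 댓글을 dictionary 형태로 변환한다."""
--     # max size taken from the first key's value, as in A
--     max_size = 0
--     for k in doc:
--         if isinstance(doc[k], list):
--             max_size = len(doc[k])
--         elif isinstance(doc[k], str):
--             max_size = 1
--         break
--
--     if max_size == 0:
--         return '', []
--
--     # column-major: pre-allocate the rows, split each key once, scatter its column
--     result = [{} for _ in range(max_size)]
--     k0 = ''
--     for k in doc:
--         k0, k1 = k.split('.', maxsplit=1)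
--         for i, v in enumerate(doc[k][:max_size]):
--             result[i][k1] = v
--
--     return k0, result
-- ===== Notes on version B (the rewrite author's own statement) =====
-- stated objective: alternative
-- what changed: A builds the result row-major (for each index i, re-split every key and fill one dict); B transposes the loops: it splits each key once and scatters that key's value column into pre-allocated row dicts.
import Mathlib
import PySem

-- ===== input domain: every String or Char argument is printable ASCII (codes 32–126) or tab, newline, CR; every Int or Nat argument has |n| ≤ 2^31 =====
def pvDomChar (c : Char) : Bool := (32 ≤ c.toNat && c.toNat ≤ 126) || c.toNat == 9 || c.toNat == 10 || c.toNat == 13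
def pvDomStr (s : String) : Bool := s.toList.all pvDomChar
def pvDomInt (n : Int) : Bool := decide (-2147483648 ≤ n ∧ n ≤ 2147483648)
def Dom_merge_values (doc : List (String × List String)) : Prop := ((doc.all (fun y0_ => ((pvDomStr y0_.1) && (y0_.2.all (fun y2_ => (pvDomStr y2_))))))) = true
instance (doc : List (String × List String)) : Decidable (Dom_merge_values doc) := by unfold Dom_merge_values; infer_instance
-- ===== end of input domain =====

-- B is a column-major transpose of A's row-major double loop: it splits each key ONCE and
-- scatters that key's value column into pre-allocated rows (objective: alternative decomposition).

-- ===== PORT A =====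
-- k.split('.', maxsplit=1)   (shared by both Pythons, which both call exactly this)
def mvSplit (k : String) : List String := (PySem.Str.splitMax? k "." 1).getD []

-- inner loop body of A: for k in doc: token = split; k0 = token[0]; k1 = token[1];
-- if len(doc[k]) > i: item[k1] = doc[k][i]      (token[1] exists under Pre_; getD "" where Python raises)
def mvInner (i : Nat) (p : String × PySem.Dict String String) (kv : String × List String) :
    String × PySem.Dict String String :=
  let token := mvSplit kv.1
  let k0 := token.headD ""
  let k1 := (PySem.List.pyGet? token 1).getD ""
  (k0, if i < kv.2.length then p.2.insert k1 (kv.2.getD i "") else p.2)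

-- outer loop body of A: item = {}; <inner loop>; result.append(item)
def mvOuter (doc : List (String × List String))
    (st : String × List (List (String × String))) (i : Nat) :
    String × List (List (String × String)) :=
  let inner := doc.foldl (mvInner i) (st.1, PySem.Dict.empty)
  (inner.1, st.2 ++ [inner.2.items])

def merge_values (doc : List (String × List String)) : String × (List (List (String × String))) :=
  -- max_size from the first key: values are lists here, so the isinstance(list) branch fires
  let max_size : Nat :=
    match doc with
    | [] => 0
    | (_, v) :: _ => v.length
  (List.range max_size).foldl (mvOuter doc) ("", [])

-- ===== PORT B =====
-- result[i][k1] = v for i, v in enumerate(vals): scatter one column into the rows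
def mvScatter (result : List (PySem.Dict String String)) (vals : List String) (k1 : String) :
    List (PySem.Dict String String) :=
  match result, vals with
  | r, [] => r
  | [], _ => []
  | d :: ds, v :: vs => d.insert k1 v :: mvScatter ds vs k1

-- loop body of B: k0, k1 = k.split('.', maxsplit=1); scatter doc[k][:max_size]
def mvColStep (m : Nat) (st : String × List (PySem.Dict String String))
    (kv : String × List String) : String × List (PySem.Dict String String) :=
  let token := mvSplit kv.1
  let k0 := token.headD ""
  let k1 := (PySem.List.pyGet? token 1).getD ""
  (k0, mvScatter st.2 (kv.2.take m) k1)

def merge_values_alt (doc : List (String × List String)) : String × (List (List (String × String))) :=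
  let max_size : Nat :=
    match doc with
    | [] => 0
    | (_, v) :: _ => v.length
  if max_size = 0 then ("", [])
  else
    let st := doc.foldl (mvColStep max_size) ("", List.replicate max_size PySem.Dict.empty)
    (st.1, st.2.map PySem.Dict.items)

-- ===== PRECONDITION & SPEC =====
-- Pre_ requires distinct keys (the Python argument is a dict, where duplicate keys cannot coexist)
-- and, when max_size > 0, a '.' in every key: on a dotless key both Pythons raise
-- (A: IndexError on token[1]; B: ValueError on unpacking).
def Pre_merge_values (doc : List (String × List String)) : Prop :=
  (doc.map Prod.fst).Nodup ∧
  ((doc.headD ("", [])).2 ≠ [] → ∀ kv ∈ doc, '.' ∈ kv.1.toList)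
instance (doc : List (String × List String)) : Decidable (Pre_merge_values doc) := by
  unfold Pre_merge_values; infer_instance

def pvWitness_merge_values : (List (String × List String)) :=
  [("reply.user", ["kim", "lee"]), ("reply.text", ["hi"])]

def Spec_merge_values (doc : List (String × List String)) (out : String × (List (List (String × String)))) : Prop := out = merge_values_alt doc
instance (doc : List (String × List String)) (out : String × (List (List (String × String)))) : Decidable (Spec_merge_values doc out) := by unfold Spec_merge_values; infer_instance

-- ===== CLAIM (what is proved, stated in full; the proofs are below) =====
def Claim_equal_merge_values : Prop := ∀ (doc : List (String × List String)), Dom_merge_values doc → Pre_merge_values doc → Spec_merge_values doc (merge_values doc)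

-- ===== LEMMAS AND PROOFS =====

-- the two component step functions the pair-folds decompose into
def mvK0Step (_s : String) (kv : String × List String) : String :=
  (mvSplit kv.1).headD ""
def mvIStep (i : Nat) (d : PySem.Dict String String) (kv : String × List String) :
    PySem.Dict String String :=
  if i < kv.2.length then
    d.insert ((PySem.List.pyGet? (mvSplit kv.1) 1).getD "") (kv.2.getD i "")
  else d

theorem mvInner_split (l : List (String × List String)) (i : Nat) (s : String)
    (d : PySem.Dict String String) :
    l.foldl (mvInner i) (s, d) = (l.foldl mvK0Step s, l.foldl (mvIStep i) d) := by
  induction l generalizing s d with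
  | nil => rfl
  | cons x xs ih =>
    simp only [List.foldl_cons, mvInner, mvK0Step, mvIStep]
    exact ih _ _

theorem mvK0_const (l : List (String × List String)) (hne : l ≠ []) (s t : String) :
    l.foldl mvK0Step s = l.foldl mvK0Step t := by
  cases l with
  | nil => exact absurd rfl hne
  | cons x xs => simp [List.foldl_cons, mvK0Step]

theorem mvOuter_eq (doc : List (String × List String)) :
    mvOuter doc = fun st i =>
      (doc.foldl mvK0Step st.1, st.2 ++ [(doc.foldl (mvIStep i) PySem.Dict.empty).items]) := by
  funext st i
  simp only [mvOuter, mvInner_split]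

theorem foldl_indep_pair {α β γ : Type} (l : List γ) (f : β → γ → β) (g : γ → α)
    (b : β) (acc : List α) :
    l.foldl (fun st x => (f st.1 x, st.2 ++ [g x])) (b, acc) = (l.foldl f b, acc ++ l.map g) := by
  induction l generalizing b acc with
  | nil => simp
  | cons x xs ih => simp [List.foldl_cons, ih]

theorem mvA_eq (doc : List (String × List String)) (m : Nat) :
    (List.range m).foldl (mvOuter doc) ("", []) =
      ((List.range m).foldl (fun s _ => doc.foldl mvK0Step s) "",
       (List.range m).map (fun i => (doc.foldl (mvIStep i) PySem.Dict.empty).items)) := by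
  rw [mvOuter_eq]
  exact foldl_indep_pair (List.range m) (fun s _ => doc.foldl mvK0Step s)
    (fun i => (doc.foldl (mvIStep i) PySem.Dict.empty).items) "" []

theorem mvA_k0 (doc : List (String × List String)) (m : Nat) (hm : 0 < m) (hd : doc ≠ []) :
    (List.range m).foldl (fun s _ => doc.foldl mvK0Step s) "" = doc.foldl mvK0Step "" := by
  obtain ⟨n, rfl⟩ : ∃ n, m = n + 1 := ⟨m - 1, by omega⟩
  rw [List.range_succ, List.foldl_append]
  exact mvK0_const doc hd _ _

-- B's fold decomposes the same way
theorem mvCol_split (m : Nat) (l : List (String × List String)) (s : String)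
    (R : List (PySem.Dict String String)) :
    l.foldl (mvColStep m) (s, R) =
      (l.foldl mvK0Step s,
       l.foldl (fun R kv => mvScatter R (kv.2.take m)
         ((PySem.List.pyGet? (mvSplit kv.1) 1).getD "")) R) := by
  induction l generalizing s R with
  | nil => rfl
  | cons x xs ih =>
    simp only [List.foldl_cons, mvColStep, mvK0Step]
    exact ih _ _

theorem mvScatter_length (R : List (PySem.Dict String String)) (vals : List String)
    (k1 : String) : (mvScatter R vals k1).length = R.length := by
  induction R generalizing vals with
  | nil => cases vals <;> rfl
  | cons d ds ih => cases vals with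
    | nil => rfl
    | cons v vs => simp [mvScatter, ih]

theorem mvScatter_getElem (R : List (PySem.Dict String String)) (vals : List String)
    (k1 : String) (i : Nat) (h : i < R.length)
    (h' : i < (mvScatter R vals k1).length) :
    (mvScatter R vals k1)[i] =
      if hv : i < vals.length then R[i].insert k1 vals[i] else R[i] := by
  induction R generalizing vals i with
  | nil => simp at h
  | cons d ds ih =>
    cases vals with
    | nil => simp [mvScatter]
    | cons v vs =>
      cases i with
      | zero => simp [mvScatter]
      | succ j =>
        simp only [mvScatter, List.getElem_cons_succ]
        rw [ih vs j (by simpa using h) (by simpa [mvScatter_length] using h)]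
        simp

-- the per-row step B performs, seen from row i
theorem mvRows_length (m : Nat) (l : List (String × List String))
    (R : List (PySem.Dict String String)) :
    (l.foldl (fun R kv => mvScatter R (kv.2.take m)
      ((PySem.List.pyGet? (mvSplit kv.1) 1).getD "")) R).length = R.length := by
  induction l generalizing R with
  | nil => rfl
  | cons x xs ih => simp [List.foldl_cons, ih, mvScatter_length]

theorem mvRows_getElem (m : Nat) (l : List (String × List String))
    (R : List (PySem.Dict String String)) (i : Nat) (h : i < R.length) (him : i < m)
    (h' : i < (l.foldl (fun R kv => mvScatter R (kv.2.take m)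
      ((PySem.List.pyGet? (mvSplit kv.1) 1).getD "")) R).length) :
    (l.foldl (fun R kv => mvScatter R (kv.2.take m)
      ((PySem.List.pyGet? (mvSplit kv.1) 1).getD "")) R)[i] =
      l.foldl (mvIStep i) R[i] := by
  induction l generalizing R with
  | nil => rfl
  | cons x xs ih =>
    simp only [List.foldl_cons]
    rw [ih _ (by simpa [mvScatter_length] using h)
      (by simp [mvRows_length, mvScatter_length]; simpa [mvScatter_length] using h)]
    congr 1
    rw [mvScatter_getElem _ _ _ _ h (by simpa [mvScatter_length] using h)]
    simp only [mvIStep]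
    rcases Nat.lt_or_ge i x.2.length with hlt | hge
    · rw [dif_pos (by simp [List.length_take]; omega), if_pos hlt]
      rw [List.getElem_take, List.getD_eq_getElem _ _ hlt]
    · rw [dif_neg (by simp [List.length_take]; omega), if_neg (by omega)]

-- ===== VERDICT (by name: the statement is the Claim_ definition above) =====
theorem merge_values_spec : Claim_equal_merge_values := by
  intro doc _ _
  unfold Spec_merge_values
  cases hdoc : doc with
  | nil => rfl
  | cons kv rest =>
    simp only [merge_values, merge_values_alt]
    set m : Nat := kv.2.length with hm
    by_cases h0 : m = 0
    · simp [h0]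
    · rw [if_neg h0, mvA_eq, mvCol_split,
        mvA_k0 _ m (by omega) (by simp)]
      refine Prod.ext rfl ?_
      apply List.ext_getElem
      · simp [mvRows_length, mvScatter_length]
      · intro i h1 h2
        rw [List.getElem_map, List.getElem_map,
          mvRows_getElem m _ _ i (by simpa [mvRows_length, mvScatter_length] using h2)
            (by simpa [mvRows_length, mvScatter_length] using h2)
            (by simpa [mvRows_length, mvScatter_length] using h2)]
        have him : i < m := by simpa using h1
        simp [List.getElem_range, List.getElem_replicate]
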